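-- pv_equiv track=rewrite | github.com/temptah/polycrisis-empirical | src/ingest/gtfs_load.py | _balance_and_drop_tail
-- ===== SOURCE A (Python) =====
-- def _balance_and_drop_tail(text: str) -> tuple[str, int]:
--     """
--     Attempt to join lines across accidental newlines inside quoted fields.
--     If the file ends still 'in quotes', drop the trailing unbalanced fragment (rows lost are negligible).
--     Returns (fixed_text, n_dropped_lines_from_tail_buffer).
--     """
--     lines = text.split("\n")
--     out_lines = []
--     buf: list[str] = []
--     in_quotes = False
--
--     for ln in lines:
--         # discount doubled quotes ("")
--         doubled = ln.count('""')
--         q = ln.count('"') - 2 * doubled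
--
--         buf.append(ln)
--         if q % 2 != 0:
--             in_quotes = not in_quotes
--
--         if not in_quotes:
--             out_lines.append("\n".join(buf))
--             buf = []
--
--     # If file ends while still "in quotes", drop the remainder entirely
--     dropped = len(buf) if buf else 0
--
--     fixed = "\n".join(out_lines)
--     if not fixed.endswith("\n"):
--         fixed += "\n"
--     return fixed, dropped
-- ===== SOURCE B (Python) =====
-- def _balance_and_drop_tail(text: str) -> tuple[str, int]:
--     # Single pass: track the running net quote balance and remember the last
--     # balanced cutoff; rebuild the output by slicing instead of buffering groups.
--     lines = text.split("\n")
--     start = 0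
--     net = 0
--     for i, ln in enumerate(lines):
--         net += ln.count('"') - 2 * ln.count('""')
--         if net % 2 == 0:
--             start = i + 1
--     fixed = "\n".join(lines[:start])
--     if not fixed.endswith("\n"):
--         fixed += "\n"
--     return fixed, len(lines) - start
-- ===== Notes on version B (the rewrite author's own statement) =====
-- stated objective: simpler
-- what changed: Replaces A's buffer-and-groups accumulation (out_lines of joined buffers plus a toggling in_quotes flag) by a single running net quote-balance counter that records the last balanced cutoff index, then rebuilds the output with one slice lines[:start] and computes dropped as len(lines) - start.
import Mathlib
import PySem

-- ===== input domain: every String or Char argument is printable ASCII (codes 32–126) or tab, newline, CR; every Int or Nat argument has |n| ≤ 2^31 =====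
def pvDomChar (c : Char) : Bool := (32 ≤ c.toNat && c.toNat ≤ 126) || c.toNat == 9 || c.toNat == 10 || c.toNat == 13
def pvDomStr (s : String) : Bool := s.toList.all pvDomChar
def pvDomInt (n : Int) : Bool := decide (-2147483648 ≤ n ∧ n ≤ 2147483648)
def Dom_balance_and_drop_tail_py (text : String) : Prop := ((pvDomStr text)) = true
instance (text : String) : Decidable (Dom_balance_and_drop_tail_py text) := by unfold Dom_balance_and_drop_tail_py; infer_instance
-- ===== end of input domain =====

-- B replaces A's group-buffer accumulation by a single balance counter that records the
-- last balanced cutoff, rebuilding the output with one slice (objective: simpler).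

-- ===== PORT A =====
-- one loop iteration of A: state (out_lines, buf, in_quotes)
def pvAStep (s : List String × List String × Bool) (ln : String) : List String × List String × Bool :=
  let doubled : Int := (PySem.Str.count ln "\"\"" : Int)
  let q : Int := (PySem.Str.count ln "\"" : Int) - 2 * doubled
  let buf := s.2.1 ++ [ln]
  let inq := if PySem.Int.mod q 2 ≠ 0 then !s.2.2 else s.2.2
  if inq = false then (s.1 ++ [PySem.Str.join "\n" buf], ([] : List String), inq)
  else (s.1, buf, inq)

def balance_and_drop_tail_py (text : String) : String × Int :=
  let lines := (PySem.Str.split? text "\n").getD []   -- sep "\n" ≠ "": split? is always some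
  let st := lines.foldl pvAStep ([], [], false)
  let dropped : Int := if st.2.1 ≠ [] then (st.2.1.length : Int) else 0
  let fixed := PySem.Str.join "\n" st.1
  let fixed := if PySem.Str.endswith fixed "\n" = false then fixed ++ "\n" else fixed
  (fixed, dropped)

-- ===== PORT B =====
-- one loop iteration of B: state (i, start, net)
def pvBStep (s : Int × Int × Int) (ln : String) : Int × Int × Int :=
  let net := s.2.2 + ((PySem.Str.count ln "\"" : Int) - 2 * (PySem.Str.count ln "\"\"" : Int))
  let start := if PySem.Int.mod net 2 = 0 then s.1 + 1 else s.2.1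
  (s.1 + 1, start, net)

def balance_and_drop_tail_py_alt (text : String) : String × Int :=
  let lines := (PySem.Str.split? text "\n").getD []   -- sep "\n" ≠ "": split? is always some
  let st := lines.foldl pvBStep (0, 0, 0)
  let fixed := PySem.Str.join "\n" (PySem.List.slice lines none (some st.2.1))
  let fixed := if PySem.Str.endswith fixed "\n" = false then fixed ++ "\n" else fixed
  (fixed, (lines.length : Int) - st.2.1)

-- ===== PRECONDITION & SPEC =====
def Spec_balance_and_drop_tail_py (text : String) (out : String × Int) : Prop := out = balance_and_drop_tail_py_alt text
instance (text : String) (out : String × Int) : Decidable (Spec_balance_and_drop_tail_py text out) := by unfold Spec_balance_and_drop_tail_py; infer_instance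

-- ===== CLAIM (what is proved, stated in full; the proofs are below) =====
def Claim_equal_balance_and_drop_tail_py : Prop := ∀ (text : String), Dom_balance_and_drop_tail_py text → Spec_balance_and_drop_tail_py text (balance_and_drop_tail_py text)

-- ===== LEMMAS AND PROOFS =====

-- join over a split into two nonempty halves
lemma chars_join_append (sep : List Char) (a b : List (List Char)) (ha : a ≠ []) (hb : b ≠ []) :
    PySem.Chars.join sep (a ++ b) = PySem.Chars.join sep a ++ sep ++ PySem.Chars.join sep b := by
  induction a with
  | nil => simp at ha
  | cons x xs ih =>
    cases xs with
    | nil =>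
      cases b with
      | nil => simp at hb
      | cons y ys => simp [PySem.Chars.join_singleton, PySem.Chars.join_cons_cons]
    | cons x' xs' =>
      have h2 := ih (by simp)
      simp only [List.cons_append] at h2 ⊢
      rw [PySem.Chars.join_cons_cons, h2, PySem.Chars.join_cons_cons]
      simp [List.append_assoc]

lemma str_join_append (sep : String) (a b : List String) (ha : a ≠ []) (hb : b ≠ []) :
    PySem.Str.join sep (a ++ b) = PySem.Str.join sep a ++ sep ++ PySem.Str.join sep b := by
  apply String.toList_injective
  simp [PySem.Str.toList_join, chars_join_append sep.toList (a.map String.toList) (b.map String.toList)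
    (by simpa using ha) (by simpa using hb)]

lemma str_join_singleton (sep x : String) : PySem.Str.join sep [x] = x := by
  apply String.toList_injective
  simp [PySem.Str.toList_join, PySem.Chars.join_singleton]

-- the flush step: appending the joined buffer to out extends the joined prefix to the whole list
lemma join_flush (p out buf : List String) (l : String) (start : Nat)
    (hbuf : buf = p.drop start) (hle : start ≤ p.length)
    (hout : PySem.Str.join "\n" out = PySem.Str.join "\n" (p.take start))
    (hz : out = [] ↔ start = 0) :
    PySem.Str.join "\n" (out ++ [PySem.Str.join "\n" (buf ++ [l])]) =
      PySem.Str.join "\n" (p ++ [l]) := by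
  by_cases h0 : out = []
  · have hs0 : start = 0 := hz.mp h0
    subst h0
    simp [hs0] at hbuf
    simp [hbuf, str_join_singleton]
  · have hs0 : start ≠ 0 := fun h => h0 (hz.mpr h)
    have hp : p ≠ [] := by
      rintro rfl
      exact hs0 (Nat.le_zero.mp hle)
    have htake : p.take start ≠ [] := by
      simp [List.take_eq_nil_iff, hs0, hp]
    rw [str_join_append "\n" out [PySem.Str.join "\n" (buf ++ [l])] h0 (by simp),
      str_join_singleton, hout, hbuf,
      ← str_join_append "\n" (p.take start) (p.drop start ++ [l]) htake (by simp),
      ← List.append_assoc, List.take_append_drop]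

-- parity bookkeeping: A's boolean toggle tracks the parity of B's running net count
lemma parity_step (net q : Int) (inq : Bool) (h : inq = decide (PySem.Int.mod net 2 ≠ 0)) :
    (if PySem.Int.mod q 2 ≠ 0 then !inq else inq) = decide (PySem.Int.mod (net + q) 2 ≠ 0) := by
  subst h
  simp only [PySem.Int.mod_eq_emod_of_pos (by norm_num : (0:Int) < 2)]
  rcases Int.emod_two_eq net with h1 | h1 <;> rcases Int.emod_two_eq q with h2 | h2 <;>
    simp [h1, h2, Int.add_emod]

-- main loop invariant: running A's fold and B's fold side by side over the remaining lines
lemma loop_rel (rest : List String) : ∀ (p out buf : List String) (net : Int) (start : Nat)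
    (inq : Bool),
    buf = p.drop start → start ≤ p.length →
    PySem.Str.join "\n" out = PySem.Str.join "\n" (p.take start) →
    (out = [] ↔ start = 0) →
    inq = decide (PySem.Int.mod net 2 ≠ 0) →
    ∃ (start' : Nat) (net' : Int),
      List.foldl pvBStep ((p.length : Int), (start : Int), net) rest =
        (((p ++ rest).length : Int), (start' : Int), net') ∧
      (List.foldl pvAStep (out, buf, inq) rest).2.1 = (p ++ rest).drop start' ∧
      start' ≤ (p ++ rest).length ∧
      PySem.Str.join "\n" (List.foldl pvAStep (out, buf, inq) rest).1 =
        PySem.Str.join "\n" ((p ++ rest).take start') ∧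
      ((List.foldl pvAStep (out, buf, inq) rest).1 = [] ↔ start' = 0) ∧
      (List.foldl pvAStep (out, buf, inq) rest).2.2 = decide (PySem.Int.mod net' 2 ≠ 0) := by
  induction rest with
  | nil =>
    intro p out buf net start inq hbuf hle hout hz hq
    exact ⟨start, net, by simp, by simpa using hbuf, by simpa using hle, by simpa using hout,
      by simpa using hz, by simpa using hq⟩
  | cons l rest ih =>
    intro p out buf net start inq hbuf hle hout hz hq
    set q : Int := ((PySem.Str.count l "\"" : Nat) : Int) - 2 * ((PySem.Str.count l "\"\"" : Nat) : Int) with hqdef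
    have hpar := parity_step net q inq hq
    by_cases hin : PySem.Int.mod (net + q) 2 = 0
    · -- flush step
      have hd : decide (PySem.Int.mod (net + q) 2 ≠ 0) = false := by
        simp only [decide_eq_false_iff_not, ne_eq, not_not]
        exact hin
      have hA : pvAStep (out, buf, inq) l =
          (out ++ [PySem.Str.join "\n" (buf ++ [l])], ([] : List String), false) := by
        simp only [pvAStep, ← hqdef]
        rw [hpar, hd]
        simp
      have hB : pvBStep ((p.length : Int), (start : Int), net) l =
          ((p.length : Int) + 1, (p.length : Int) + 1, net + q) := by
        simp only [pvBStep, ← hqdef]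
        rw [if_pos hin]
      have hstep := ih (p ++ [l]) (out ++ [PySem.Str.join "\n" (buf ++ [l])]) [] (net + q)
        (p.length + 1) false (by simp) (by simp)
        (by rw [List.take_of_length_le (by simp)]
            exact join_flush p out buf l start hbuf hle hout hz)
        (by simp) (by rw [hd])
      rw [List.foldl_cons, List.foldl_cons, hA, hB]
      rw [← List.append_cons] at hstep
      simpa using hstep
    · -- no flush
      have hd : decide (PySem.Int.mod (net + q) 2 ≠ 0) = true := by
        simpa using hin
      have hA : pvAStep (out, buf, inq) l = (out, buf ++ [l], true) := by
        simp only [pvAStep, ← hqdef]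
        rw [hpar, hd]
        simp
      have hB : pvBStep ((p.length : Int), (start : Int), net) l =
          ((p.length : Int) + 1, (start : Int), net + q) := by
        simp only [pvBStep, ← hqdef]
        rw [if_neg hin]
      have hstep := ih (p ++ [l]) out (buf ++ [l]) (net + q) start true
        (by rw [List.drop_append_of_le_length hle, ← hbuf])
        (by simp
            omega)
        (by rw [List.take_append_of_le_length hle]
            exact hout)
        hz (by rw [hd])
      rw [List.foldl_cons, List.foldl_cons, hA, hB]
      rw [← List.append_cons] at hstep
      simpa using hstep

-- ===== VERDICT (by name: the statement is the Claim_ definition above) =====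
theorem balance_and_drop_tail_py_spec : Claim_equal_balance_and_drop_tail_py := by
  intro text _
  unfold Spec_balance_and_drop_tail_py balance_and_drop_tail_py balance_and_drop_tail_py_alt
  set lines := (PySem.Str.split? text "\n").getD [] with hl
  obtain ⟨start', net', hb, h1, h2, h3, h4, h5⟩ :=
    loop_rel lines [] [] [] 0 0 false rfl (by simp) (by simp) (by simp) (by simp)
  simp only [List.nil_append] at hb h1 h2 h3 h4 h5
  have hb' : List.foldl pvBStep (0, 0, 0) lines = ((lines.length : Int), (start' : Int), net') := by
    simpa using hb
  dsimp only
  rw [hb']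
  simp only [PySem.List.slice_to_natCast]
  refine Prod.ext ?_ ?_
  · simp only [h3]
  · simp only [h1]
    have hlen : (lines.drop start').length = lines.length - start' := by simp
    by_cases hnil : lines.drop start' = []
    · have : lines.length ≤ start' := by
        have := congrArg List.length hnil
        simp at this
        omega
      simp [hnil]
      omega
    · simp [hnil, hlen]
      omega
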